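-- pv_equiv track=rewrite | github.com/TalonT-Org/AutoSkillit | src/autoskillit/hooks/_fmt_recipe.py | _strip_yaml_ingredients_block
-- ===== SOURCE A (Python) =====
-- def _strip_yaml_ingredients_block(yaml_text: str) -> str:
--     """Remove the top-level `ingredients:` block from YAML text.
--
--     Called by _fmt_recipe_body() when ingredients_table is present, so the
--     RECIPE block does not repeat the TABLE block. Operates line-by-line:
--     drops the `ingredients:` key and all its indented children until a
--     non-indented line signals the next top-level key. Preserves all other
--     top-level keys (steps, kitchen_rules, description, etc.) unchanged.
--     """
--     lines = yaml_text.splitlines(keepends=True)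
--     result: list[str] = []
--     in_ingredients = False
--     for line in lines:
--         if line.startswith("ingredients:"):
--             in_ingredients = True
--             continue
--         if in_ingredients:
--             if line and not line[0].isspace():
--                 # First non-indented non-empty line = next top-level key
--                 in_ingredients = False
--                 result.append(line)
--             # else: still inside the ingredients block — skip
--         else:
--             result.append(line)
--     return "".join(result)
-- ===== SOURCE B (Python) =====
-- def _strip_yaml_ingredients_block(yaml_text: str) -> str:
--     """Partition lines into top-level blocks, then drop ingredients blocks."""
--     lines = yaml_text.splitlines(keepends=True)
--
--     def is_top(line):
--         return bool(line) and not line[0].isspace()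
--
--     # leading lines before the first top-level key are always kept
--     i = 0
--     while i < len(lines) and not is_top(lines[i]):
--         i += 1
--     out = lines[:i]
--     # partition the remainder into blocks [header, indented/blank lines...]
--     blocks = []
--     while i < len(lines):
--         j = i + 1
--         while j < len(lines) and not is_top(lines[j]):
--             j += 1
--         blocks.append(lines[i:j])
--         i = j
--     for b in blocks:
--         if not b[0].startswith("ingredients:"):
--             out.extend(b)
--     return "".join(out)
-- ===== Notes on version B (the rewrite author's own statement) =====
-- stated objective: alternative
-- what changed: Replaces the running in_ingredients boolean flag with an explicit two-phase structure: partition the lines into top-level blocks (header plus its indented/blank lines), then filter out blocks whose header starts with 'ingredients:' and join the rest.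
import Mathlib
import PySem

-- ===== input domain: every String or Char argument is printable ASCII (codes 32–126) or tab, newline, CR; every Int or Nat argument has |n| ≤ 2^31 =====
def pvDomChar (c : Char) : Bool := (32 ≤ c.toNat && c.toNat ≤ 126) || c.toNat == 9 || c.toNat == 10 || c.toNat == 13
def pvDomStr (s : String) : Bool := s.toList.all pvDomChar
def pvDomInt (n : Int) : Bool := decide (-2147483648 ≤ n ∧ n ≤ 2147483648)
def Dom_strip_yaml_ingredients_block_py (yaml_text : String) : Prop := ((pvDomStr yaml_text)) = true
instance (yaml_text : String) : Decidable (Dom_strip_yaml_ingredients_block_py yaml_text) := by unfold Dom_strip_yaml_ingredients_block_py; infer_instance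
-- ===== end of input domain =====

-- B replaces A's running in_ingredients flag by an explicit partition of the lines into
-- top-level blocks followed by a filter on the block headers (alternative decomposition, same cost).

-- splitlines(keepends=True): hand port, exact on the Dom alphabet (line breaks there are only \n, \r, \r\n;
-- the extra Unicode/control breaks Python also recognises are outside Dom). Shared by both ports (same Python call).
def pvSplitKeepAux : List Char → List Char → List (List Char)
  | acc, [] => if acc = [] then [] else [acc.reverse]
  | acc, '\r' :: '\n' :: rest => (acc.reverse ++ ['\r', '\n']) :: pvSplitKeepAux [] rest
  | acc, '\r' :: rest => (acc.reverse ++ ['\r']) :: pvSplitKeepAux [] rest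
  | acc, '\n' :: rest => (acc.reverse ++ ['\n']) :: pvSplitKeepAux [] rest
  | acc, c :: rest => pvSplitKeepAux (c :: acc) rest

def pvSplitKeep (s : List Char) : List (List Char) := pvSplitKeepAux [] s

def pvIngKey : List Char := "ingredients:".toList

-- 'line and not line[0].isspace()' (used by both Pythons: A's inline test, B's is_top helper)
def pvIsTop : List Char → Bool
  | [] => false
  | c :: _ => !(PySem.Chars.isspace c)

-- ===== PORT A =====
def pvStepA (st : List (List Char) × Bool) (line : List Char) : List (List Char) × Bool :=
  if PySem.Chars.startswith line pvIngKey then (st.1, true)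
  else if st.2 then
    if pvIsTop line then (st.1 ++ [line], false) else st
  else (st.1 ++ [line], false)

def strip_yaml_ingredients_block_py (yaml_text : String) : String :=
  let lines := pvSplitKeep yaml_text.toList
  let st := lines.foldl pvStepA ([], false)
  String.ofList (PySem.Chars.join [] st.1)

-- ===== PORT B =====
def pvBlocksB : List (List Char) → List (List (List Char))
  | [] => []
  | h :: t =>
      (h :: t.takeWhile (fun l => !pvIsTop l)) :: pvBlocksB (t.dropWhile (fun l => !pvIsTop l))
termination_by l => l.length
decreasing_by
  exact Nat.lt_succ_of_le (List.length_dropWhile_le _ _)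

def strip_yaml_ingredients_block_py_alt (yaml_text : String) : String :=
  let lines := pvSplitKeep yaml_text.toList
  let lead := lines.takeWhile (fun l => !pvIsTop l)
  let rest := lines.dropWhile (fun l => !pvIsTop l)
  let kept := (pvBlocksB rest).filter
    (fun b => !(PySem.Chars.startswith (b.headD []) pvIngKey))
  String.ofList (PySem.Chars.join [] (lead ++ kept.flatten))

-- ===== PRECONDITION & SPEC =====
def Spec_strip_yaml_ingredients_block_py (yaml_text : String) (out : String) : Prop := out = strip_yaml_ingredients_block_py_alt yaml_text
instance (yaml_text : String) (out : String) : Decidable (Spec_strip_yaml_ingredients_block_py yaml_text out) := by unfold Spec_strip_yaml_ingredients_block_py; infer_instance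

-- ===== CLAIM (what is proved, stated in full; the proofs are below) =====
def Claim_equal_strip_yaml_ingredients_block_py : Prop := ∀ (yaml_text : String), Dom_strip_yaml_ingredients_block_py yaml_text → Spec_strip_yaml_ingredients_block_py yaml_text (strip_yaml_ingredients_block_py yaml_text)

-- ===== LEMMAS AND PROOFS =====

-- a non-top line never starts with "ingredients:"
lemma not_ing_of_not_top (l : List Char) (h : pvIsTop l = false) :
    PySem.Chars.startswith l pvIngKey = false := by
  cases hs : PySem.Chars.startswith l pvIngKey
  · rfl
  · exfalso
    have hp := (PySem.Chars.startswith_iff l pvIngKey).mp hs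
    obtain ⟨t, ht⟩ := hp
    cases l with
    | nil => simp [pvIngKey] at ht
    | cons c cs =>
        have hc : c = 'i' := by
          simpa [pvIngKey, List.cons_append] using congrArg (fun xs => xs.headD ' ') ht.symm
        simp [pvIsTop, hc] at h
        exact absurd h (by decide)

lemma foldl_notTop_false (body : List (List Char)) (acc : List (List Char))
    (h : ∀ l ∈ body, pvIsTop l = false) :
    body.foldl pvStepA (acc, false) = (acc ++ body, false) := by
  induction body generalizing acc with
  | nil => simp
  | cons l t ih =>
      have hl : pvIsTop l = false := h l (by simp)
      have : pvStepA (acc, false) l = (acc ++ [l], false) := by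
        simp [pvStepA, not_ing_of_not_top l hl]
      rw [List.foldl_cons, this, ih (acc ++ [l]) (fun x hx => h x (by simp [hx]))]
      simp

lemma foldl_notTop_true (body : List (List Char)) (acc : List (List Char))
    (h : ∀ l ∈ body, pvIsTop l = false) :
    body.foldl pvStepA (acc, true) = (acc, true) := by
  induction body with
  | nil => simp
  | cons l t ih =>
      have hl : pvIsTop l = false := h l (by simp)
      have : pvStepA (acc, true) l = (acc, true) := by
        simp [pvStepA, not_ing_of_not_top l hl, hl]
      rw [List.foldl_cons, this, ih (fun x hx => h x (by simp [hx]))]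

lemma head_dropWhile_top (t : List (List Char)) :
    t.dropWhile (fun l => !pvIsTop l) = [] ∨
    pvIsTop ((t.dropWhile (fun l => !pvIsTop l)).headD []) = true := by
  cases hd : t.dropWhile (fun l => !pvIsTop l) with
  | nil => exact Or.inl rfl
  | cons h' t' =>
      right
      have := List.head_dropWhile_not (p := fun l => !pvIsTop l) (l := t)
        (by simp [hd])
      simp only [hd] at this ⊢
      simpa using this

lemma blocks_fold : ∀ n (rest : List (List Char)), rest.length ≤ n →
    (rest = [] ∨ pvIsTop (rest.headD []) = true) →
    ∀ (acc : List (List Char)) (b : Bool),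
      (rest.foldl pvStepA (acc, b)).1 =
        acc ++ ((pvBlocksB rest).filter
          (fun bl => !(PySem.Chars.startswith (bl.headD []) pvIngKey))).flatten := by
  intro n
  induction n with
  | zero =>
      intro rest hlen _ acc b
      have : rest = [] := List.eq_nil_of_length_eq_zero (Nat.le_zero.mp hlen)
      subst this; simp [pvBlocksB]
  | succ n ih =>
      intro rest hlen hhead acc b
      cases rest with
      | nil => simp [pvBlocksB]
      | cons h t =>
          have htop : pvIsTop h = true := by
            rcases hhead with h1 | h2
            · exact absurd h1 (by simp)
            · simpa using h2
          have hbody : ∀ l ∈ t.takeWhile (fun l => !pvIsTop l), pvIsTop l = false := by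
            intro l hl
            have := List.mem_takeWhile_imp hl
            simpa using this
          have hsplit : t.takeWhile (fun l => !pvIsTop l) ++ t.dropWhile (fun l => !pvIsTop l) = t :=
            List.takeWhile_append_dropWhile
          have hlen' : (t.dropWhile (fun l => !pvIsTop l)).length ≤ n := by
            have h1 := List.length_dropWhile_le (fun l => !pvIsTop l) t
            have h2 : t.length + 1 ≤ n + 1 := by simpa using hlen
            omega
          have hhead' := head_dropWhile_top t
          rw [show (h :: t) = h :: (t.takeWhile (fun l => !pvIsTop l) ++ t.dropWhile (fun l => !pvIsTop l)) by rw [hsplit]]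
          rw [List.foldl_cons, List.foldl_append]
          by_cases hing : PySem.Chars.startswith h pvIngKey = true
          · have hstep : pvStepA (acc, b) h = (acc, true) := by simp [pvStepA, hing]
            rw [hstep, foldl_notTop_true _ _ hbody,
              ih (t.dropWhile (fun l => !pvIsTop l)) hlen' hhead' acc true]
            have hhd : ((h :: t.takeWhile (fun l => !pvIsTop l)).headD []) = h := rfl
            simp only [pvBlocksB, List.filter_cons]
            simp [hing]
          · have hing' : PySem.Chars.startswith h pvIngKey = false := by
              simpa using hing
            have hstep : pvStepA (acc, b) h = (acc ++ [h], false) := by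
              cases b <;> simp [pvStepA, hing', htop]
            rw [hstep, foldl_notTop_false _ _ hbody,
              ih (t.dropWhile (fun l => !pvIsTop l)) hlen' hhead' _ false]
            simp only [pvBlocksB, List.filter_cons]
            simp [hing']

-- ===== VERDICT (by name: the statement is the Claim_ definition above) =====
theorem strip_yaml_ingredients_block_py_spec : Claim_equal_strip_yaml_ingredients_block_py := by
  intro yaml_text _
  unfold Spec_strip_yaml_ingredients_block_py
  unfold strip_yaml_ingredients_block_py strip_yaml_ingredients_block_py_alt
  simp only
  set lines := pvSplitKeep yaml_text.toList with hl
  have hbody : ∀ l ∈ lines.takeWhile (fun l => !pvIsTop l), pvIsTop l = false := by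
    intro l hlm
    have := List.mem_takeWhile_imp hlm
    simpa using this
  have hsplit : lines.takeWhile (fun l => !pvIsTop l) ++ lines.dropWhile (fun l => !pvIsTop l) = lines :=
    List.takeWhile_append_dropWhile
  congr 1
  conv_lhs => rw [← hsplit]
  rw [List.foldl_append, foldl_notTop_false _ _ hbody,
    blocks_fold (lines.dropWhile (fun l => !pvIsTop l)).length _ le_rfl
      (head_dropWhile_top lines) _ false]
  simp
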